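-- pv_equiv track=rewrite | github.com/NeneWang/docs_rpggo | src/quests/generator.py | extractNN
-- ===== SOURCE A (Python) =====
-- def extractNN(postag):
--     NN = []
--     cur_NN = ""
--     for cur_tag in postag:
--         if "NN" in cur_tag[1] and cur_tag[0] != "thi" and not "," in cur_tag[0]:
--             cur_NN = cur_NN + cur_tag[0].capitalize() + " "
--             selected_NN = cur_NN
--         else:
--             if len(cur_NN) != 0:
--                 NN.append(cur_NN)
--             cur_NN = ""
--     NN.append(cur_NN)
--     if (len(NN) == 0):
--         NN.append("Flower ")
--     return max(NN, key=len)
-- ===== SOURCE B (Python) =====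
-- def extractNN(postag):
--     # One pass keeping only the best run so far (strict '>' keeps the first
--     # maximum, matching max(key=len)'s tie rule); no run list is built.
--     best = ""
--     cur = ""
--     for word, tag in postag:
--         if "NN" in tag and word != "thi" and "," not in word:
--             cur += word.capitalize() + " "
--         else:
--             if len(cur) > len(best):
--                 best = cur
--             cur = ""
--     if len(cur) > len(best):
--         best = cur
--     return best
-- ===== Notes on version B (the rewrite author's own statement) =====
-- stated objective: simpler
-- what changed: Instead of collecting every run into a list, appending a trailing empty run and taking max(key=len), B keeps a single running best run in one pass (strict > preserves the first-max tie rule) and builds no list at all.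
import Mathlib
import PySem

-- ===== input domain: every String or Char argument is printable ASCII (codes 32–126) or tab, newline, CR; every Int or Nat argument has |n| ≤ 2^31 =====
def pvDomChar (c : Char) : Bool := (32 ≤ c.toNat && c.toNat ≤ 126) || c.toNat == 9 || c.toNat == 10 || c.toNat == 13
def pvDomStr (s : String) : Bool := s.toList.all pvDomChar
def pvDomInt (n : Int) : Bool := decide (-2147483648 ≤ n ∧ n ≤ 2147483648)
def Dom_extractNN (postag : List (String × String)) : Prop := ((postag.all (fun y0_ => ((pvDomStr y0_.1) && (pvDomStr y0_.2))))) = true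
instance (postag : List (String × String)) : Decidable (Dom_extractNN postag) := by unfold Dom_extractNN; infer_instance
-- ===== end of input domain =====

-- B replaces A's collect-all-runs-then-max(key=len) with a single pass that keeps
-- only the best run so far (same value; objective: simpler, no run list built).

-- str.capitalize(): first char uppercased, rest lowered (exact on ASCII, the stated domain)
def pyCapitalize (s : List Char) : List Char :=
  match s with
  | [] => []
  | c :: cs => PySem.Chars.upperChar c :: PySem.Chars.lower cs

-- the shared condition: "NN" in tag and word != "thi" and not "," in word
def nnCond (t : String × String) : Bool :=
  PySem.Str.isIn "NN" t.2 && t.1 != "thi" && !(PySem.Str.isIn "," t.1)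

-- ===== PORT A =====
-- literal port of A; strings are carried as List Char (PySem's exact string side);
-- A's 'selected_NN' is assigned but never read, so it carries no state here.
def extractNN (postag : List (String × String)) : String :=
  let st := postag.foldl
    (fun (st : List (List Char) × List Char) cur_tag =>
      if nnCond cur_tag then
        (st.1, st.2 ++ pyCapitalize cur_tag.1.toList ++ [' '])
      else
        if st.2.length ≠ 0 then (st.1 ++ [st.2], []) else (st.1, []))
    ([], [])
  let NN := st.1 ++ [st.2]
  let NN2 := if NN.length = 0 then NN ++ ["Flower ".toList] else NN
  match PySem.List.max? NN2 (fun s => s.length) with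
  | some m => String.mk m
  | none => ""  -- unreachable (NN2 is never empty); Python's max would raise here

-- ===== PORT B =====
def extractNN_alt (postag : List (String × String)) : String :=
  let st := postag.foldl
    (fun (st : List Char × List Char) t =>
      if nnCond t then
        (st.1, st.2 ++ pyCapitalize t.1.toList ++ [' '])
      else
        (if st.1.length < st.2.length then st.2 else st.1, []))
    ([], [])
  String.mk (if st.1.length < st.2.length then st.2 else st.1)

-- ===== PRECONDITION & SPEC =====
def Spec_extractNN (postag : List (String × String)) (out : String) : Prop := out = extractNN_alt postag
instance (postag : List (String × String)) (out : String) : Decidable (Spec_extractNN postag out) := by unfold Spec_extractNN; infer_instance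

-- ===== CLAIM (what is proved, stated in full; the proofs are below) =====
def Claim_equal_extractNN : Prop := ∀ (postag : List (String × String)), Dom_extractNN postag → Spec_extractNN postag (extractNN postag)

-- ===== LEMMAS AND PROOFS =====

-- the streaming "keep the longer, prefer the earlier" step used by B
def bstep (b r : List Char) : List Char := if b.length < r.length then r else b

-- PySem.List.max? with key = length is the streaming first-max fold
lemma max?_len_cons (t : List (List Char)) : ∀ x, PySem.List.max? (x :: t) (fun s : List Char => s.length) = some (t.foldl bstep x) := by
  induction t with
  | nil => intro x; rfl
  | cons y t ih =>
    intro x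
    have h1 : PySem.List.max? (x :: y :: t) (fun s : List Char => s.length)
        = PySem.List.max? (bstep x y :: t) (fun s : List Char => s.length) := by
      simp only [PySem.List.max?, List.foldl_cons, bstep]
      split_ifs <;> rfl
    rw [h1, ih (bstep x y), List.foldl_cons]

lemma bstep_nil_left (x : List Char) : bstep [] x = x := by
  unfold bstep
  split_ifs with h
  · rfl
  · simp only [List.length_nil, Nat.not_lt, Nat.le_zero, List.length_eq_zero_iff] at h
    exact h.symm

lemma bstep_append (NN : List (List Char)) (cur : List Char) :
    (NN ++ [cur]).foldl bstep [] = bstep (NN.foldl bstep []) cur := by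
  simp [List.foldl_append]

-- loop invariant: B's state is (streaming best of A's closed runs, A's current run)
lemma loop_invariant (postag : List (String × String)) (NN : List (List Char)) (cur : List Char) :
    postag.foldl
      (fun (st : List Char × List Char) t =>
        if nnCond t then (st.1, st.2 ++ pyCapitalize t.1.toList ++ [' '])
        else (if st.1.length < st.2.length then st.2 else st.1, []))
      (NN.foldl bstep [], cur)
    =
    (let stA := postag.foldl
        (fun (st : List (List Char) × List Char) cur_tag =>
          if nnCond cur_tag then (st.1, st.2 ++ pyCapitalize cur_tag.1.toList ++ [' '])
          else if st.2.length ≠ 0 then (st.1 ++ [st.2], []) else (st.1, []))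
        (NN, cur)
     (stA.1.foldl bstep [], stA.2)) := by
  induction postag generalizing NN cur with
  | nil => rfl
  | cons t rest ih =>
    simp only [List.foldl_cons]
    by_cases h : nnCond t = true
    · simp only [h, if_true]
      exact ih NN (cur ++ pyCapitalize t.1.toList ++ [' '])
    · simp only [if_neg h]
      by_cases hc : cur.length ≠ 0
      · simp only [if_pos hc]
        have hb : (if (NN.foldl bstep []).length < cur.length then cur else NN.foldl bstep [])
            = (NN ++ [cur]).foldl bstep [] := by
          rw [bstep_append]; rfl
        rw [hb]
        exact ih (NN ++ [cur]) []
      · simp only [if_neg hc]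
        have hcur : cur = [] := List.length_eq_zero_iff.mp (by omega)
        subst hcur
        have hb : (if (NN.foldl bstep []).length < ([] : List Char).length
            then ([] : List Char) else NN.foldl bstep []) = NN.foldl bstep [] := by
          simp
        rw [hb]
        exact ih NN []

lemma ports_eq (postag : List (String × String)) : extractNN postag = extractNN_alt postag := by
  unfold extractNN extractNN_alt
  have h := loop_invariant postag [] []
  simp only [List.foldl_nil] at h
  rw [h]
  generalize postag.foldl
      (fun (st : List (List Char) × List Char) cur_tag =>
        if nnCond cur_tag then (st.1, st.2 ++ pyCapitalize cur_tag.1.toList ++ [' '])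
        else if st.2.length ≠ 0 then (st.1 ++ [st.2], []) else (st.1, []))
      ([], []) = stA
  obtain ⟨NN, cur⟩ := stA
  simp only []
  have hlen : ¬ (NN ++ [cur]).length = 0 := by simp
  rw [if_neg hlen]
  obtain ⟨y, ys, hys⟩ := List.exists_cons_of_ne_nil (show NN ++ [cur] ≠ [] by simp)
  rw [hys, max?_len_cons]
  have h2 : ys.foldl bstep y = (NN ++ [cur]).foldl bstep [] := by
    rw [hys, List.foldl_cons, bstep_nil_left]
  rw [h2, bstep_append]
  rfl

-- ===== VERDICT (by name: the statement is the Claim_ definition above) =====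
theorem extractNN_spec : Claim_equal_extractNN := by
  intro postag _
  unfold Spec_extractNN
  exact ports_eq postag
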